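-- pv_equiv track=rewrite | github.com/Dudoxx/dudoxx_langchain | find_orphans.py | categorize_orphans
-- ===== SOURCE A (Python) =====
-- from typing import Dict, List, Set, Tuple
--
-- def categorize_orphans(orphans: List[str]) -> Dict[str, List[str]]:
--     """Categorize orphaned files."""
--     categories = {
--         "examples": [],
--         "tests": [],
--         "documentation": [],
--         "utilities": [],
--         "frontend": [],
--         "backend": [],
--         "misc": [],
--     }
--
--     for file_path in orphans:
--         if file_path.startswith("examples/"):
--             categories["examples"].append(file_path)
--         elif "test" in file_path.lower():
--             categories["tests"].append(file_path)
--         elif file_path.endswith(".md") or "docs" in file_path: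
--             categories["documentation"].append(file_path)
--         elif "utils" in file_path or "helpers" in file_path:
--             categories["utilities"].append(file_path)
--         elif file_path.startswith("dudoxx_extraction_frontend/") or file_path.startswith("dudoxx_extraction_nextjs/"):
--             categories["frontend"].append(file_path)
--         elif file_path.startswith("dudoxx_extraction/") or file_path.startswith("dudoxx_extraction_api/"):
--             categories["backend"].append(file_path)
--         else:
--             categories["misc"].append(file_path)
--
--     return categories
-- ===== SOURCE B (Python) =====
-- def categorize_orphans(orphans):
--     """Categorize orphaned files by staged partition: peel off one category at a time."""
--     def split(pred, paths):
--         hit, rest = [], []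
--         for p in paths:
--             (hit if pred(p) else rest).append(p)
--         return hit, rest
--
--     categories = {}
--     remaining = list(orphans)
--     categories["examples"], remaining = split(lambda p: p.startswith("examples/"), remaining)
--     categories["tests"], remaining = split(lambda p: "test" in p.lower(), remaining)
--     categories["documentation"], remaining = split(lambda p: p.endswith(".md") or "docs" in p, remaining)
--     categories["utilities"], remaining = split(lambda p: "utils" in p or "helpers" in p, remaining)
--     categories["frontend"], remaining = split(lambda p: p.startswith(("dudoxx_extraction_frontend/", "dudoxx_extraction_nextjs/")), remaining)
--     categories["backend"], remaining = split(lambda p: p.startswith(("dudoxx_extraction/", "dudoxx_extraction_api/")), remaining)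
--     categories["misc"] = remaining
--     return categories
-- ===== Notes on version B (the rewrite author's own statement) =====
-- stated objective: alternative
-- what changed: A makes one pass over the paths dispatching each through a seven-way if/elif chain; B instead makes six staged partition passes, one per category in priority order, each peeling its matches off a shrinking remainder list, with the leftover becoming 'misc'.
import Mathlib
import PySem

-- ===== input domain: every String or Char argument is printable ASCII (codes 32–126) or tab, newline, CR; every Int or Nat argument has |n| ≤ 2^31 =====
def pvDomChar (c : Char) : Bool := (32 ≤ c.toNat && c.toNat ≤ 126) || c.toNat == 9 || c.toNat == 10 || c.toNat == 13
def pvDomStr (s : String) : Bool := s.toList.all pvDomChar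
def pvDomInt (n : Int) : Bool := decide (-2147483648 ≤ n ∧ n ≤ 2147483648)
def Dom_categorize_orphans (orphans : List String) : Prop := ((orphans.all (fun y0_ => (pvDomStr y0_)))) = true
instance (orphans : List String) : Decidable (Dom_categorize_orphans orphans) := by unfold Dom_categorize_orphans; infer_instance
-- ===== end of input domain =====

-- B replaces A's one-pass seven-way if/elif dispatch by six staged partition passes, one per category over a shrinking remainder list (objective: alternative).


-- ===== PORT A =====
def pvInitCats : PySem.Dict String (List String) :=
  PySem.Dict.ofList
    [("examples", []), ("tests", []), ("documentation", []), ("utilities", []),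
     ("frontend", []), ("backend", []), ("misc", [])]

def categorize_orphans (orphans : List String) : List (String × List String) :=
  (orphans.foldl (fun d file_path =>
    if PySem.Str.startswith file_path "examples/" then
      d.modify "examples" [] (· ++ [file_path])
    else if PySem.Str.isIn "test" (PySem.Str.lower file_path) then
      d.modify "tests" [] (· ++ [file_path])
    else if PySem.Str.endswith file_path ".md" || PySem.Str.isIn "docs" file_path then
      d.modify "documentation" [] (· ++ [file_path])
    else if PySem.Str.isIn "utils" file_path || PySem.Str.isIn "helpers" file_path then
      d.modify "utilities" [] (· ++ [file_path])
    else if PySem.Str.startswith file_path "dudoxx_extraction_frontend/" ||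
            PySem.Str.startswith file_path "dudoxx_extraction_nextjs/" then
      d.modify "frontend" [] (· ++ [file_path])
    else if PySem.Str.startswith file_path "dudoxx_extraction/" ||
            PySem.Str.startswith file_path "dudoxx_extraction_api/" then
      d.modify "backend" [] (· ++ [file_path])
    else
      d.modify "misc" [] (· ++ [file_path])) pvInitCats).items

-- ===== PORT B =====
-- split(pred, paths): one pass appending each path to 'hit' or 'rest'
def pvSplit (pred : String → Bool) (paths : List String) : List String × List String :=
  paths.foldl (fun hr p => if pred p then (hr.1 ++ [p], hr.2) else (hr.1, hr.2 ++ [p])) ([], [])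

def categorize_orphans_alt (orphans : List String) : List (String × List String) :=
  let s1 := pvSplit (fun p => PySem.Str.startswith p "examples/") orphans
  let s2 := pvSplit (fun p => PySem.Str.isIn "test" (PySem.Str.lower p)) s1.2
  let s3 := pvSplit (fun p => PySem.Str.endswith p ".md" || PySem.Str.isIn "docs" p) s2.2
  let s4 := pvSplit (fun p => PySem.Str.isIn "utils" p || PySem.Str.isIn "helpers" p) s3.2
  let s5 := pvSplit (fun p => PySem.Str.startswith p "dudoxx_extraction_frontend/" ||
                              PySem.Str.startswith p "dudoxx_extraction_nextjs/") s4.2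
  let s6 := pvSplit (fun p => PySem.Str.startswith p "dudoxx_extraction/" ||
                              PySem.Str.startswith p "dudoxx_extraction_api/") s5.2
  [("examples", s1.1), ("tests", s2.1), ("documentation", s3.1), ("utilities", s4.1),
   ("frontend", s5.1), ("backend", s6.1), ("misc", s6.2)]

-- ===== PRECONDITION & SPEC =====
def Spec_categorize_orphans (orphans : List String) (out : List (String × List String)) : Prop := out = categorize_orphans_alt orphans
instance (orphans : List String) (out : List (String × List String)) : Decidable (Spec_categorize_orphans orphans out) := by unfold Spec_categorize_orphans; infer_instance

-- ===== CLAIM =====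
def Claim_equal_categorize_orphans : Prop := ∀ (orphans : List String), Dom_categorize_orphans orphans → Spec_categorize_orphans orphans (categorize_orphans orphans)

-- ===== LEMMAS AND PROOFS =====

-- proof-side classifier: the category A's if/elif chain assigns to a path
def pvCat (p : String) : String :=
  if PySem.Str.startswith p "examples/" then "examples"
  else if PySem.Str.isIn "test" (PySem.Str.lower p) then "tests"
  else if PySem.Str.endswith p ".md" || PySem.Str.isIn "docs" p then "documentation"
  else if PySem.Str.isIn "utils" p || PySem.Str.isIn "helpers" p then "utilities"
  else if PySem.Str.startswith p "dudoxx_extraction_frontend/" ||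
          PySem.Str.startswith p "dudoxx_extraction_nextjs/" then "frontend"
  else if PySem.Str.startswith p "dudoxx_extraction/" ||
          PySem.Str.startswith p "dudoxx_extraction_api/" then "backend"
  else "misc"

def pvNames : List String :=
  ["examples", "tests", "documentation", "utilities", "frontend", "backend", "misc"]

-- split is filter/filter-not, by induction with generalized accumulators
theorem pv_split_go (pred : String → Bool) (l : List String) (a b : List String) :
    l.foldl (fun hr p => if pred p then (hr.1 ++ [p], hr.2) else (hr.1, hr.2 ++ [p])) (a, b)
      = (a ++ l.filter pred, b ++ l.filter (fun p => !pred p)) := by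
  induction l generalizing a b with
  | nil => simp
  | cons x xs ih =>
    cases h : pred x <;> simp [List.foldl_cons, h, ih]

theorem pv_split_eq (pred : String → Bool) (paths : List String) :
    pvSplit pred paths = (paths.filter pred, paths.filter (fun p => !pred p)) := by
  unfold pvSplit; rw [pv_split_go]; simp

-- A returns each of the seven buckets as a filter of the input by pvCat
theorem pvA_char (orphans : List String) :
    categorize_orphans orphans
      = pvNames.map (fun nm => (nm, orphans.filter (fun p => pvCat p == nm))) := by
  have hf : categorize_orphans orphans
      = (orphans.foldl (fun d p => d.modify (pvCat p) [] (· ++ [p])) pvInitCats).items := by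
    unfold categorize_orphans
    congr 1
    apply List.foldl_ext
    intro d p _
    unfold pvCat
    split_ifs <;> rfl
  rw [hf]
  have hkeys : (orphans.foldl (fun d p => d.modify (pvCat p) [] (· ++ [p])) pvInitCats).keys = pvNames := by
    rw [PySem.Dict.keys_foldl_modify_key orphans pvCat [] (fun _ p v => v ++ [p]) pvInitCats]
    rw [PySem.Set.update_eq_append_filter]
    have : (PySem.Set.ofList (orphans.map pvCat)).filter
        (fun y => !(PySem.Set.contains pvInitCats.keys y)) = [] := by
      rw [List.filter_eq_nil_iff]
      intro y hy
      have hy' := (PySem.Set.mem_ofList (xs := orphans.map pvCat) (y := y)).1 hy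
      obtain ⟨p, _, rfl⟩ := List.mem_map.1 hy'
      unfold pvCat
      split_ifs <;> decide
    rw [this]
    decide
  have hnd : (orphans.foldl (fun d p => d.modify (pvCat p) [] (· ++ [p])) pvInitCats).keys.Nodup :=
    PySem.Dict.nodup_keys_foldl_modify_key orphans pvCat [] (fun _ p v => v ++ [p]) pvInitCats (by decide)
  rw [PySem.Dict.items_eq_map_keys _ hnd [], hkeys]
  have hget : ∀ c, (orphans.foldl (fun d p => d.modify (pvCat p) [] (· ++ [p])) pvInitCats).getD c []
      = pvInitCats.getD c [] ++ orphans.filter (fun p => pvCat p == c) := by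
    intro c
    rw [← List.foldl_map (f := fun p => (pvCat p, p))
        (g := fun (d : PySem.Dict String (List String)) (q : String × String) => d.modify q.1 [] (· ++ [q.2]))]
    rw [PySem.Dict.getD_foldl_modify_append]
    rw [List.filter_map]
    simp [Function.comp_def, List.map_map]
  apply List.map_congr_left
  intro k hk
  have hinit : pvInitCats.getD k [] = [] := by
    fin_cases hk <;> decide
  simp [hget k, hinit]

-- B's staged partitions produce exactly the same filters
theorem pvB_char (orphans : List String) :
    categorize_orphans_alt orphans
      = pvNames.map (fun nm => (nm, orphans.filter (fun p => pvCat p == nm))) := by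
  unfold categorize_orphans_alt
  simp only [pv_split_eq, List.filter_filter, pvNames, List.map, List.cons.injEq, Prod.mk.injEq,
    true_and, and_true]
  refine ⟨?_, ?_, ?_, ?_, ?_, ?_, ?_⟩ <;>
  · apply List.filter_congr
    intro x _
    unfold pvCat
    cases h1 : PySem.Str.startswith x "examples/" <;>
    cases h2 : PySem.Str.isIn "test" (PySem.Str.lower x) <;>
    cases h3 : (PySem.Str.endswith x ".md" || PySem.Str.isIn "docs" x) <;>
    cases h4 : (PySem.Str.isIn "utils" x || PySem.Str.isIn "helpers" x) <;>
    cases h5 : (PySem.Str.startswith x "dudoxx_extraction_frontend/" ||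
                PySem.Str.startswith x "dudoxx_extraction_nextjs/") <;>
    cases h6 : (PySem.Str.startswith x "dudoxx_extraction/" ||
                PySem.Str.startswith x "dudoxx_extraction_api/") <;>
    simp [h1, h2, h3, h4, h5, h6]

-- ===== VERDICT =====
theorem categorize_orphans_spec : Claim_equal_categorize_orphans := by
  intro orphans _
  unfold Spec_categorize_orphans
  rw [pvA_char, pvB_char]
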